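-- pv_equiv track=rewrite | github.com/Altu-Bitu-2/Altu_Bitu_yerimso | [3월 22일] 구현 & 코너케이스/prac3.py | diet_simulation
-- ===== SOURCE A (Python) =====
-- def diet_simulation(initial_weight, I0, T, period, energy_in, a):    # 기초대사량이 변화를 고려할 때 다이어트 후 체중, 일일 기초대사량을 연산하는 함수
--     b = I0                                          # 초기 일일 기초대사량 저장
--     weight = initial_weight                         # 초기 몸무게 저장
--     for _ in range(period):                         # 다이어트 기간만큼 반복
--         energy_out = a + b                          # 일일 에너지 소비량 연산 (일일 기초 대사량 + 일일 활동 대사량)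
--         weight += energy_in - energy_out            # 에너지 섭취량에서 에너지 소비량을 뺀만큼 체중이 증가
--
--         if abs(energy_in - energy_out) > T:         # 만약 (일일 에너지 섭취량 - 일일 에너지 소비량)의 절댓값이 역치 T보다 크다면
--             b += (energy_in - energy_out) // 2      # 기초대사량 += (일일 에너지 섭취량 - 일일 에너지 소비량)/2
--
--     return weight, b                                # 다이어트 후 최종 몸무게와 기초대사량을 반환한다
-- ===== SOURCE B (Python) =====
-- def diet_simulation(initial_weight, I0, T, period, energy_in, a):
--     # O(log) halving loop: once the daily delta is within threshold (or its
--     # half rounds to 0), b never changes again and the rest is one jump.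
--     weight, b = initial_weight, I0
--     steps = period if period > 0 else 0
--     while steps > 0:
--         delta = energy_in - a - b
--         if abs(delta) > T and delta // 2 != 0:
--             weight += delta
--             b += delta // 2
--             steps -= 1
--         else:
--             weight += delta * steps
--             steps = 0
--     return weight, b
-- ===== Notes on version B (the rewrite author's own statement) =====
-- stated objective: faster
-- what changed: B replaces the O(period) day-by-day loop with a loop that runs only while the metabolism b still changes (the daily delta roughly halves each such step), then adds the now-constant daily delta times the remaining days in a single multiplication.
import Mathlib
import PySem

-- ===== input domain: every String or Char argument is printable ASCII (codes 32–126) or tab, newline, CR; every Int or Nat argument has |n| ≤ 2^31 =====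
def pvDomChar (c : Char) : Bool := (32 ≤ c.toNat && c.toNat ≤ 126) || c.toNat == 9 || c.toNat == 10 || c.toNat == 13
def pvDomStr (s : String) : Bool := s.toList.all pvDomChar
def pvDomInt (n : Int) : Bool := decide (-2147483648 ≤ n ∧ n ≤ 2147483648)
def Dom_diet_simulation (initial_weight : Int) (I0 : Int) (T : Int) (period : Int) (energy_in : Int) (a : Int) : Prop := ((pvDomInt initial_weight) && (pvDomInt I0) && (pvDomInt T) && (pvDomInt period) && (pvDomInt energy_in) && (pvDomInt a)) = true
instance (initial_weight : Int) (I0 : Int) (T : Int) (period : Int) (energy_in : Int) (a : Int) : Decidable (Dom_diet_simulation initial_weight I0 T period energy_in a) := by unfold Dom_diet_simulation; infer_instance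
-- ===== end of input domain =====

-- B replaces the O(period) day-by-day simulation by an O(log) loop: it iterates only while
-- b still changes (the delta halves each such day), then adds the now-constant daily delta
-- times the remaining days in one jump.

-- ===== PORT A =====
-- A's for-loop over range(period): fuel = number of iterations (period.toNat = len(range(period)))
def dietA_loop (T energy_in a : Int) : Nat → Int → Int → Int × Int
  | 0, weight, b => (weight, b)
  | n+1, weight, b =>
    let energy_out := a + b
    let weight' := weight + (energy_in - energy_out)
    let b' := if |energy_in - energy_out| > T
              then b + PySem.Int.floordiv (energy_in - energy_out) 2
              else b
    dietA_loop T energy_in a n weight' b'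

def diet_simulation (initial_weight : Int) (I0 : Int) (T : Int) (period : Int) (energy_in : Int) (a : Int) : Int × Int :=
  dietA_loop T energy_in a period.toNat initial_weight I0

-- ===== PORT B =====
-- B's while-loop; steps (a Nat, = max(period,0)) bounds the recursion
def dietB_loop (T energy_in a : Int) : Nat → Int → Int → Int × Int
  | 0, weight, b => (weight, b)
  | n+1, weight, b =>
    let delta := energy_in - a - b
    if |delta| > T ∧ PySem.Int.floordiv delta 2 ≠ 0 then
      dietB_loop T energy_in a n (weight + delta) (b + PySem.Int.floordiv delta 2)
    else
      (weight + delta * (n+1 : Nat), b)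

def diet_simulation_alt (initial_weight : Int) (I0 : Int) (T : Int) (period : Int) (energy_in : Int) (a : Int) : Int × Int :=
  dietB_loop T energy_in a (if period > 0 then period else 0).toNat initial_weight I0

-- ===== PRECONDITION & SPEC =====
def Spec_diet_simulation (initial_weight : Int) (I0 : Int) (T : Int) (period : Int) (energy_in : Int) (a : Int) (out : Int × Int) : Prop := out = diet_simulation_alt initial_weight I0 T period energy_in a
instance (initial_weight : Int) (I0 : Int) (T : Int) (period : Int) (energy_in : Int) (a : Int) (out : Int × Int) : Decidable (Spec_diet_simulation initial_weight I0 T period energy_in a out) := by unfold Spec_diet_simulation; infer_instance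

-- ===== CLAIM (what is proved, stated in full; the proofs are below) =====
def Claim_equal_diet_simulation : Prop := ∀ (initial_weight : Int) (I0 : Int) (T : Int) (period : Int) (energy_in : Int) (a : Int), Dom_diet_simulation initial_weight I0 T period energy_in a → Spec_diet_simulation initial_weight I0 T period energy_in a (diet_simulation initial_weight I0 T period energy_in a)

-- ===== LEMMAS AND PROOFS =====

-- Once the b-update is (effectively) nothing, A's remaining iterations each add the same delta.
theorem dietA_loop_const (T energy_in a : Int) (n : Nat) (weight b : Int)
    (h : ¬ (|energy_in - a - b| > T ∧ PySem.Int.floordiv (energy_in - a - b) 2 ≠ 0)) :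
    dietA_loop T energy_in a n weight b = (weight + (energy_in - a - b) * n, b) := by
  induction n generalizing weight with
  | zero => simp [dietA_loop]
  | succ k ih =>
    have hd : energy_in - (a + b) = energy_in - a - b := by ring
    by_cases hT : |energy_in - a - b| > T
    · have hz : PySem.Int.floordiv (energy_in - a - b) 2 = 0 := by
        by_contra hz; exact h ⟨hT, hz⟩
      simp only [dietA_loop, hd, hT, if_pos, hz]
      rw [show b + 0 = b from by ring, ih (weight + (energy_in - a - b))]
      simp only [Prod.mk.injEq]; refine ⟨by push_cast; ring, trivial⟩
    · simp only [dietA_loop, hd, if_neg hT]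
      rw [ih (weight + (energy_in - a - b))]
      simp only [Prod.mk.injEq]; refine ⟨by push_cast; ring, trivial⟩

theorem loops_eq (T energy_in a : Int) (n : Nat) (weight b : Int) :
    dietA_loop T energy_in a n weight b = dietB_loop T energy_in a n weight b := by
  induction n generalizing weight b with
  | zero => rfl
  | succ k ih =>
    by_cases hc : |energy_in - a - b| > T ∧ PySem.Int.floordiv (energy_in - a - b) 2 ≠ 0
    · have hd : energy_in - (a + b) = energy_in - a - b := by ring
      rw [show dietA_loop T energy_in a (k+1) weight b = dietA_loop T energy_in a k
            (weight + (energy_in - a - b)) (b + PySem.Int.floordiv (energy_in - a - b) 2)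
          from by simp only [dietA_loop, hd, if_pos hc.1]]
      rw [show dietB_loop T energy_in a (k+1) weight b = dietB_loop T energy_in a k
            (weight + (energy_in - a - b)) (b + PySem.Int.floordiv (energy_in - a - b) 2)
          from by simp only [dietB_loop]; rw [if_pos hc]]
      exact ih _ _
    · rw [dietA_loop_const T energy_in a (k+1) weight b hc]
      simp only [dietB_loop, if_neg hc]

-- ===== VERDICT (by name: the statement is the Claim_ definition above) =====
theorem diet_simulation_spec : Claim_equal_diet_simulation := by
  intro iw I0 T period ei a _
  unfold Spec_diet_simulation diet_simulation diet_simulation_alt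
  have : (if period > 0 then period else 0).toNat = period.toNat := by
    split <;> omega
  rw [this, loops_eq]
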